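-- pv_equiv track=rewrite | github.com/aegiswizard/elf | elf/checks/actions.py | _find_run_blocks
-- ===== SOURCE A (Python) =====
-- def _find_run_blocks(yaml_text: str) -> list:
--     """Extract all run: block values from a workflow file."""
--     run_blocks = []
--     lines = yaml_text.split("\n")
--     in_run = False
--     current = []
--     for line in lines:
--         stripped = line.strip()
--         if stripped.startswith("run:"):
--             in_run = True
--             rest = stripped[4:].strip().lstrip("|").lstrip(">").strip()
--             if rest:
--                 current.append(rest)
--         elif in_run:
--             if stripped and not stripped.startswith("-") and ":" in stripped and not stripped.startswith("#"):
--                 if current: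
--                     run_blocks.append("\n".join(current))
--                 current = []
--                 in_run = False
--             else:
--                 current.append(stripped)
--     if current:
--         run_blocks.append("\n".join(current))
--     return run_blocks
-- ===== SOURCE B (Python) =====
-- def _extract(seg):
--     """Collect block content of one segment: from the first run: line onward."""
--     piece = []
--     started = False
--     for s in seg:
--         if s.startswith("run:"):
--             started = True
--             rest = s[4:].strip().lstrip("|").lstrip(">").strip()
--             if rest:
--                 piece.append(rest)
--         elif started:
--             piece.append(s)
--     return piece
--
--
-- def _find_run_blocks(yaml_text: str) -> list:
--     """Extract all run: block values: split at key-like lines, then harvest each segment."""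
--     stripped = [ln.strip() for ln in yaml_text.split("\n")]
--     # stage 1: cut the line list at every key-like line that is not itself a run: line
--     segments = []
--     seg = []
--     for s in stripped:
--         if s and not s.startswith(("-", "#", "run:")) and ":" in s:
--             segments.append(seg)
--             seg = []
--         else:
--             seg.append(s)
--     segments.append(seg)
--     # stage 2: within each segment, collect from the first run: line onward
--     pieces = [_extract(seg) for seg in segments]
--     return ["\n".join(p) for p in pieces if p]
-- ===== Notes on version B (the rewrite author's own statement) =====
-- stated objective: alternative
-- what changed: Replaces A's one-pass state machine (in_run flag, current buffer) by staged passes: first split the stripped line list into segments at every key-like non-run line, then independently extract each segment's block (lines from its first run: line onward) and keep the non-empty joins.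
import Mathlib
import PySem

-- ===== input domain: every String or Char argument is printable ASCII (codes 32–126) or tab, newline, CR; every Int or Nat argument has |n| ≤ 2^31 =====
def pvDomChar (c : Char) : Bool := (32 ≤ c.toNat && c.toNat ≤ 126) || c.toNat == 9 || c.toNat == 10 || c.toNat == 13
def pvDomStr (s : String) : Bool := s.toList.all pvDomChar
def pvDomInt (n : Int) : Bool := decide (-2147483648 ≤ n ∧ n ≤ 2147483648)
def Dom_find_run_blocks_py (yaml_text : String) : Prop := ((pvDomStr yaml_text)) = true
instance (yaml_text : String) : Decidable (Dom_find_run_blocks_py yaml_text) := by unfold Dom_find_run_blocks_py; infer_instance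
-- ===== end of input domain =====

-- B replaces A's one-pass state machine (in_run flag + current buffer) by staged passes:
-- split the stripped lines into segments at key-like non-run lines, then extract each
-- segment's block independently; objective: alternative decomposition, same cost.


def pvRun4 : List Char := ['r', 'u', 'n', ':']

-- stripped[4:].strip().lstrip("|").lstrip(">").strip(); .lstrip with a one-char set is dropWhile of that char
def pvParseRest (t : List Char) : List Char :=
  PySem.Chars.strip (((PySem.Chars.strip (PySem.List.slice t (some 4) none)).dropWhile (· == '|')).dropWhile (· == '>'))

-- ===== PORT A =====
-- A's terminator test: stripped and not stripped.startswith("-") and ":" in stripped and not stripped.startswith("#")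
def pvIsTerm (t : List Char) : Bool :=
  !t.isEmpty && !PySem.Chars.startswith t ['-'] && PySem.Chars.isIn [':'] t && !PySem.Chars.startswith t ['#']

-- state: (run_blocks, in_run, current); blocks kept as List Char, turned into String at the very end
def pvStepA (st : List (List Char) × Bool × List (List Char)) (line : List Char) :
    List (List Char) × Bool × List (List Char) :=
  let stripped := PySem.Chars.strip line
  if PySem.Chars.startswith stripped pvRun4 then
    let rest := pvParseRest stripped
    (st.1, true, if rest.isEmpty then st.2.2 else st.2.2 ++ [rest])
  else if st.2.1 then
    if pvIsTerm stripped then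
      (if st.2.2.isEmpty then st.1 else st.1 ++ [PySem.Chars.join ['\n'] st.2.2], false, [])
    else
      (st.1, true, st.2.2 ++ [stripped])
  else st

def find_run_blocks_py (yaml_text : String) : List String :=
  let lines := PySem.Chars.splitOn yaml_text.toList ['\n']
  let st := lines.foldl pvStepA ([], false, [])
  (if st.2.2.isEmpty then st.1 else st.1 ++ [PySem.Chars.join ['\n'] st.2.2]).map String.ofList

-- ===== PORT B =====
-- B's cut test: s and not s.startswith(("-", "#", "run:")) and ":" in s
def pvIsTermB (t : List Char) : Bool :=
  !t.isEmpty &&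
    !(PySem.Chars.startswith t ['-'] || PySem.Chars.startswith t ['#'] || PySem.Chars.startswith t pvRun4) &&
    PySem.Chars.isIn [':'] t

-- stage 1 loop body: state (segments, seg)
def pvSplitStep (st : List (List (List Char)) × List (List Char)) (s : List Char) :
    List (List (List Char)) × List (List Char) :=
  if pvIsTermB s then (st.1 ++ [st.2], []) else (st.1, st.2 ++ [s])

-- _extract loop body: state (piece, started)
def pvExtractStep (st : List (List Char) × Bool) (s : List Char) : List (List Char) × Bool :=
  if PySem.Chars.startswith s pvRun4 then
    ((if (pvParseRest s).isEmpty then st.1 else st.1 ++ [pvParseRest s]), true)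
  else if st.2 then (st.1 ++ [s], true)
  else st

def pvExtract (seg : List (List Char)) : List (List Char) :=
  (seg.foldl pvExtractStep ([], false)).1

def find_run_blocks_py_alt (yaml_text : String) : List String :=
  let stripped := (PySem.Chars.splitOn yaml_text.toList ['\n']).map PySem.Chars.strip
  let st := stripped.foldl pvSplitStep ([], [])
  let segments := st.1 ++ [st.2]
  let pieces := segments.map pvExtract
  ((pieces.filter (fun p => !p.isEmpty)).map (fun p => PySem.Chars.join ['\n'] p)).map String.ofList

-- ===== PRECONDITION & SPEC =====
def Spec_find_run_blocks_py (yaml_text : String) (out : List String) : Prop := out = find_run_blocks_py_alt yaml_text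
instance (yaml_text : String) (out : List String) : Decidable (Spec_find_run_blocks_py yaml_text out) := by unfold Spec_find_run_blocks_py; infer_instance

-- ===== CLAIM (what is proved, stated in full; the proofs are below) =====
def Claim_equal_find_run_blocks_py : Prop := ∀ (yaml_text : String), Dom_find_run_blocks_py yaml_text → Spec_find_run_blocks_py yaml_text (find_run_blocks_py yaml_text)

-- ===== LEMMAS AND PROOFS =====

-- recursive views of B's three loops
def pvOptRest (s : List Char) : List (List Char) :=
  if (pvParseRest s).isEmpty then [] else [pvParseRest s]

def pvE1 : List (List Char) → List (List Char)
  | [] => []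
  | s :: r => if PySem.Chars.startswith s pvRun4 then pvOptRest s ++ pvE1 r else s :: pvE1 r

def pvE0 : List (List Char) → List (List Char)
  | [] => []
  | s :: r => if PySem.Chars.startswith s pvRun4 then pvOptRest s ++ pvE1 r else pvE0 r

def pvSegs : List (List Char) → List (List Char) → List (List (List Char))
  | cur, [] => [cur]
  | cur, s :: r => if pvIsTermB s then cur :: pvSegs [] r else pvSegs (cur ++ [s]) r

def pvJ (p : List (List Char)) : List (List Char) :=
  if p.isEmpty then [] else [PySem.Chars.join ['\n'] p]

def pvFlush (st : List (List Char) × Bool × List (List Char)) : List (List Char) :=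
  if st.2.2.isEmpty then st.1 else st.1 ++ [PySem.Chars.join ['\n'] st.2.2]

theorem pvSplit_fold (ls : List (List Char)) :
    ∀ segs cur, (ls.foldl pvSplitStep (segs, cur)).1 ++ [(ls.foldl pvSplitStep (segs, cur)).2] =
      segs ++ pvSegs cur ls := by
  induction ls with
  | nil => intro segs cur; simp [pvSegs]
  | cons s r ih =>
    intro segs cur
    simp only [List.foldl_cons, pvSplitStep, pvSegs]
    by_cases h : pvIsTermB s = true
    · simp [h, ih]
    · simp [h, ih]

theorem pvExtract_fold (ls : List (List Char)) :
    ∀ piece, (ls.foldl pvExtractStep (piece, false)).1 = piece ++ pvE0 ls ∧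
      (ls.foldl pvExtractStep (piece, true)).1 = piece ++ pvE1 ls := by
  induction ls with
  | nil => intro piece; simp [pvE0, pvE1]
  | cons s r ih =>
    intro piece
    simp only [List.foldl_cons, pvExtractStep, pvE0, pvE1]
    by_cases h : PySem.Chars.startswith s pvRun4 = true
    · by_cases he : (pvParseRest s).isEmpty = true <;>
        simp [h, he, (ih _).2, pvOptRest]
    · simp [h, (ih piece).1, (ih (piece ++ [s])).2]

theorem pvRender (segs : List (List (List Char))) :
    ((segs.map pvExtract).filter (fun p => !p.isEmpty)).map (fun p => PySem.Chars.join ['\n'] p) =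
      segs.flatMap (fun seg => pvJ (pvE0 seg)) := by
  induction segs with
  | nil => simp
  | cons seg r ih =>
    have he : pvExtract seg = pvE0 seg := by simpa using (pvExtract_fold seg []).1
    by_cases h : (pvE0 seg).isEmpty = true
    · simp [he, pvJ, ih, List.isEmpty_iff.mp h]
    · have h' : pvE0 seg ≠ [] := by simpa [List.isEmpty_iff] using h
      simp [he, h, h', pvJ, ih]

theorem pvE1_append (a b : List (List Char)) : pvE1 (a ++ b) = pvE1 a ++ pvE1 b := by
  induction a with
  | nil => simp [pvE1]
  | cons s r ih =>
    by_cases h : PySem.Chars.startswith s pvRun4 = true <;> simp [pvE1, h, ih]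

theorem pvE0_noRun (a : List (List Char)) (h : ∀ s ∈ a, PySem.Chars.startswith s pvRun4 = false) :
    ∀ b, pvE0 (a ++ b) = pvE0 b := by
  induction a with
  | nil => intro b; rfl
  | cons s r ih =>
    intro b
    have hs := h s (by simp)
    simp only [List.cons_append, pvE0, hs, Bool.false_eq_true, if_false]
    exact ih (fun t ht => h t (by simp [ht])) b

theorem pvE0_hasRun (a : List (List Char)) (h : ∃ s ∈ a, PySem.Chars.startswith s pvRun4 = true) :
    ∀ b, pvE0 (a ++ b) = pvE0 a ++ pvE1 b := by
  induction a with
  | nil => rcases h with ⟨s, hs, _⟩; cases hs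
  | cons s r ih =>
    intro b
    by_cases hs : PySem.Chars.startswith s pvRun4 = true
    · simp [pvE0, hs, pvE1_append]
    · have hr : ∃ t ∈ r, PySem.Chars.startswith t pvRun4 = true := by
        rcases h with ⟨t, ht, hrun⟩
        rcases List.mem_cons.mp ht with rfl | ht'
        · exact absurd hrun hs
        · exact ⟨t, ht', hrun⟩
      simp [pvE0, hs, ih hr]

-- A's terminator test agrees with B's cut test on non-run lines
theorem pvTerm_eq (t : List Char) (h : PySem.Chars.startswith t pvRun4 = false) :
    pvIsTermB t = pvIsTerm t := by
  unfold pvIsTermB pvIsTerm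
  rw [h]
  cases t.isEmpty <;> cases PySem.Chars.startswith t ['-'] <;>
    cases PySem.Chars.startswith t ['#'] <;> cases PySem.Chars.isIn [':'] t <;> rfl

-- joint loop invariant: A's fold equals B's segment rendering, tracking the pending segment
theorem pvKey (ls : List (List Char)) :
    ∀ blocks,
      (∀ cur, (∀ s ∈ cur, PySem.Chars.startswith s pvRun4 = false) →
        pvFlush (ls.foldl pvStepA (blocks, false, [])) =
          blocks ++ (pvSegs cur (ls.map PySem.Chars.strip)).flatMap (fun seg => pvJ (pvE0 seg))) ∧
      (∀ pref, (∃ s ∈ pref, PySem.Chars.startswith s pvRun4 = true) →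
        pvFlush (ls.foldl pvStepA (blocks, true, pvE0 pref)) =
          blocks ++ (pvSegs pref (ls.map PySem.Chars.strip)).flatMap (fun seg => pvJ (pvE0 seg))) := by
  induction ls with
  | nil =>
    intro blocks
    constructor
    · intro cur hc
      have : pvE0 cur = [] := by simpa using pvE0_noRun cur hc []
      simp [pvFlush, pvSegs, pvJ, this]
    · intro pref _
      by_cases h : pvE0 pref = [] <;> simp [pvFlush, pvSegs, pvJ, h, List.isEmpty_iff]
  | cons line r ih =>
    intro blocks
    constructor
    · intro cur hc
      simp only [List.foldl_cons, pvStepA, List.map_cons, pvSegs]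
      set t := PySem.Chars.strip line with ht
      by_cases hrun : PySem.Chars.startswith t pvRun4 = true
      · have hterm : pvIsTermB t = false := by simp [pvIsTermB, hrun]
        have hcur : pvE0 (cur ++ [t]) = if (pvParseRest t).isEmpty then [] else [pvParseRest t] := by
          rw [pvE0_noRun cur hc [t]]; simp [pvE0, hrun, pvE1, pvOptRest]
        have hhas : ∃ s ∈ cur ++ [t], PySem.Chars.startswith s pvRun4 = true :=
          ⟨t, by simp, hrun⟩
        simp only [hrun, if_true, hterm, Bool.false_eq_true, if_false]
        rw [show (if (pvParseRest t).isEmpty then ([] : List (List Char)) else [] ++ [pvParseRest t]) =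
            pvE0 (cur ++ [t]) by simp [hcur]]
        exact (ih blocks).2 (cur ++ [t]) hhas
      · have hrun' : PySem.Chars.startswith t pvRun4 = false := eq_false_of_ne_true hrun
        simp only [hrun', Bool.false_eq_true, if_false]
        by_cases hterm : pvIsTermB t = true
        · have : pvE0 cur = [] := by simpa using pvE0_noRun cur hc []
          simp only [hterm, if_true, List.flatMap_cons, this, pvJ, List.isEmpty_nil, if_true,
            List.nil_append]
          exact (ih blocks).1 [] (by simp)
        · simp only [eq_false_of_ne_true hterm, Bool.false_eq_true, if_false]
          exact (ih blocks).1 (cur ++ [t])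
            (fun s hs => by rcases List.mem_append.mp hs with h1 | h1
                            · exact hc s h1
                            · simp at h1; subst h1; exact hrun')
    · intro pref hp
      simp only [List.foldl_cons, pvStepA, List.map_cons, pvSegs]
      set t := PySem.Chars.strip line with ht
      by_cases hrun : PySem.Chars.startswith t pvRun4 = true
      · have hterm : pvIsTermB t = false := by simp [pvIsTermB, hrun]
        have hpref : pvE0 (pref ++ [t]) =
            (if (pvParseRest t).isEmpty then pvE0 pref else pvE0 pref ++ [pvParseRest t]) := by
          rw [pvE0_hasRun pref hp [t]]
          simp only [pvE1, hrun, if_true, pvOptRest]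
          by_cases he : (pvParseRest t).isEmpty = true <;> simp [he]
        have hhas : ∃ s ∈ pref ++ [t], PySem.Chars.startswith s pvRun4 = true :=
          ⟨t, by simp, hrun⟩
        simp only [hrun, if_true, hterm, Bool.false_eq_true, if_false]
        rw [show (if (pvParseRest t).isEmpty then pvE0 pref else pvE0 pref ++ [pvParseRest t]) =
            pvE0 (pref ++ [t]) from hpref.symm]
        exact (ih blocks).2 (pref ++ [t]) hhas
      · have hrun' : PySem.Chars.startswith t pvRun4 = false := eq_false_of_ne_true hrun
        simp only [hrun', Bool.false_eq_true, if_false, if_true]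
        by_cases hterm : pvIsTerm t = true
        · have htB : pvIsTermB t = true := by rw [pvTerm_eq t hrun']; exact hterm
          simp only [hterm, if_true, htB, List.flatMap_cons]
          have := (ih (if (pvE0 pref).isEmpty then blocks
              else blocks ++ [PySem.Chars.join ['\n'] (pvE0 pref)])).1 [] (by simp)
          rw [this]
          by_cases he : (pvE0 pref).isEmpty = true <;> simp [he, pvJ]
        · have htB : pvIsTermB t = false := by rw [pvTerm_eq t hrun']; exact eq_false_of_ne_true hterm
          have hpref : pvE0 pref ++ [t] = pvE0 (pref ++ [t]) := by
            rw [pvE0_hasRun pref hp [t]]; simp [pvE1, hrun']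
          simp only [eq_false_of_ne_true hterm, Bool.false_eq_true, if_false, htB]
          rw [hpref]
          exact (ih blocks).2 (pref ++ [t])
            (by rcases hp with ⟨s, hs, h⟩; exact ⟨s, by simp [hs], h⟩)

-- ===== VERDICT (by name: the statement is the Claim_ definition above) =====
theorem find_run_blocks_py_spec : Claim_equal_find_run_blocks_py := by
  intro yaml_text _
  unfold Spec_find_run_blocks_py find_run_blocks_py find_run_blocks_py_alt
  show List.map String.ofList
      (pvFlush ((PySem.Chars.splitOn yaml_text.toList ['\n']).foldl pvStepA ([], false, []))) = _
  rw [((pvKey (PySem.Chars.splitOn yaml_text.toList ['\n'])) []).1 [] (by simp)]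
  have hs := pvSplit_fold ((PySem.Chars.splitOn yaml_text.toList ['\n']).map PySem.Chars.strip) [] []
  simp only [List.nil_append] at hs
  simp only [pvRender, hs, List.nil_append]
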